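-- pv_equiv track=rewrite | github.com/astrzalk/AdventOfCode2018 | advent2018/day02_inventory_management_system.py | get_checksum
-- ===== SOURCE A (Python) =====
-- from typing import Dict, List, Tuple
--
-- def get_counts(s: str) -> Dict[str, int]:
--     d = dict()
--     for l in s:
--         d[l] = d.get(l, 0) + 1
--     return d
--
-- def get_checksum(inputs: List[str]) -> int:
--     two_cnt, three_cnt = 0, 0
--     for s in inputs:
--         cnts = get_counts(s)
--         if 2 in cnts.values():
--             two_cnt += 1
--         if 3 in cnts.values():
--             three_cnt += 1
--     return two_cnt * three_cnt
-- ===== SOURCE B (Python) =====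
-- from typing import List
--
--
-- def _run_lengths(chars) -> List[int]:
--     # chars is sorted; collect lengths of maximal runs of equal characters
--     runs = []
--     prev, run = None, 0
--     for c in chars:
--         if c == prev:
--             run += 1
--         else:
--             if run > 0:
--                 runs.append(run)
--             prev, run = c, 1
--     if run > 0:
--         runs.append(run)
--     return runs
--
--
-- def get_checksum(inputs: List[str]) -> int:
--     two_cnt, three_cnt = 0, 0
--     for s in inputs:
--         runs = _run_lengths(sorted(s))
--         if 2 in runs:
--             two_cnt += 1
--         if 3 in runs:
--             three_cnt += 1
--     return two_cnt * three_cnt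
-- ===== Notes on version B (the rewrite author's own statement) =====
-- stated objective: alternative
-- what changed: Replaced the per-string hash-dict frequency counter with sort-then-scan: each string is sorted and lengths of maximal runs of equal adjacent characters are collected, the 2/3 flags read off those run lengths.
import Mathlib
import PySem

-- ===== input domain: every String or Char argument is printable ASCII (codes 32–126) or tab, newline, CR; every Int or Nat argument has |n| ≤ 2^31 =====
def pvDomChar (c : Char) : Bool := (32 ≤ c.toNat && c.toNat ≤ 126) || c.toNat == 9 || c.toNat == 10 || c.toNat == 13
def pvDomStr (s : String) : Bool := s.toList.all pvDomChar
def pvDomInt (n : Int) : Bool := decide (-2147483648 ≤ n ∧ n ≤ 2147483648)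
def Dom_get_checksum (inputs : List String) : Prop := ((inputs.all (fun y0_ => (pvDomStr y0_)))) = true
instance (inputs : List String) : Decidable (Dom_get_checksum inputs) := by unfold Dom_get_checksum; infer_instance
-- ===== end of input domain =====

-- B replaces A's per-string hash-dict letter counter with sort-then-scan run lengths (alternative decomposition, same results).


-- ===== PORT A =====
def get_counts (s : String) : PySem.Dict Char Int :=
  s.toList.foldl (fun d l => d.insert l (d.getD l 0 + 1)) PySem.Dict.empty

def get_checksum (inputs : List String) : Int :=
  let r := inputs.foldl (fun (acc : Int × Int) s =>
    let cnts := get_counts s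
    let two := if (2 : Int) ∈ cnts.values then acc.1 + 1 else acc.1
    let three := if (3 : Int) ∈ cnts.values then acc.2 + 1 else acc.2
    (two, three)) (0, 0)
  r.1 * r.2

-- ===== PORT B =====
-- one step of the run-length scan: state = (runs so far, previous char, current run length)
def rlStep (st : List Int × Option Char × Int) (c : Char) : List Int × Option Char × Int :=
  if some c = st.2.1 then (st.1, st.2.1, st.2.2 + 1)
  else ((if st.2.2 > 0 then st.1 ++ [st.2.2] else st.1), some c, 1)

def runLengths (chars : List Char) : List Int :=
  let st := chars.foldl rlStep ([], none, 0)
  if st.2.2 > 0 then st.1 ++ [st.2.2] else st.1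

def get_checksum_alt (inputs : List String) : Int :=
  let r := inputs.foldl (fun (acc : Int × Int) s =>
    let runs := runLengths (PySem.List.sorted s.toList (fun x => x) false)
    let two := if (2 : Int) ∈ runs then acc.1 + 1 else acc.1
    let three := if (3 : Int) ∈ runs then acc.2 + 1 else acc.2
    (two, three)) (0, 0)
  r.1 * r.2

-- ===== PRECONDITION & SPEC =====
def Spec_get_checksum (inputs : List String) (out : Int) : Prop := out = get_checksum_alt inputs
instance (inputs : List String) (out : Int) : Decidable (Spec_get_checksum inputs out) := by unfold Spec_get_checksum; infer_instance

-- ===== CLAIM (what is proved, stated in full; the proofs are below) =====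
def Claim_equal_get_checksum : Prop := ∀ (inputs : List String), Dom_get_checksum inputs → Spec_get_checksum inputs (get_checksum inputs)

-- ===== LEMMAS AND PROOFS =====

-- recursive twin of the run-length scan, for reasoning
def rlGo (c : Char) (n : Int) : List Char → List Int
  | [] => [n]
  | d :: rest => if d = c then rlGo c (n + 1) rest else n :: rlGo d 1 rest

def rlRec : List Char → List Int
  | [] => []
  | c :: ys => rlGo c 1 ys

def rlFinish (st : List Int × Option Char × Int) : List Int :=
  if st.2.2 > 0 then st.1 ++ [st.2.2] else st.1

lemma rlStep_self (runs : List Int) (c : Char) (n : Int) :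
    rlStep (runs, some c, n) c = (runs, some c, n + 1) := by
  simp [rlStep]

lemma rlStep_ne (runs : List Int) (c d : Char) (n : Int) (h : d ≠ c) (hn : 0 < n) :
    rlStep (runs, some c, n) d = (runs ++ [n], some d, 1) := by
  simp [rlStep, h, hn]

lemma foldl_rlStep (ys : List Char) : ∀ (runs : List Int) (c : Char) (n : Int), 0 < n →
    rlFinish (ys.foldl rlStep (runs, some c, n)) = runs ++ rlGo c n ys := by
  induction ys with
  | nil => intro runs c n hn; simp [rlFinish, rlGo, hn]
  | cons d rest ih =>
    intro runs c n hn
    by_cases h : d = c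
    · subst h
      rw [List.foldl_cons, rlStep_self, ih runs d (n + 1) (by omega), rlGo, if_pos rfl]
    · rw [List.foldl_cons, rlStep_ne runs c d n h hn, ih (runs ++ [n]) d 1 (by omega),
        rlGo, if_neg h]
      simp

lemma runLengths_eq_rlRec (zs : List Char) : runLengths zs = rlRec zs := by
  cases zs with
  | nil => rfl
  | cons c ys =>
    have h0 : rlStep ([], none, 0) c = ([], some c, 1) := by simp [rlStep]
    have : runLengths (c :: ys) = rlFinish ((c :: ys).foldl rlStep ([], none, 0)) := rfl
    rw [this, List.foldl_cons, h0, foldl_rlStep ys [] c 1 (by omega)]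
    rfl

lemma rlGo_spec (ys : List Char) : ∀ (c : Char) (n : Int),
    ys.Pairwise (· ≤ ·) → (∀ d ∈ ys, c ≤ d) →
    rlGo c n ys = (n + ys.count c) :: rlRec (ys.filter (fun d => d ≠ c)) := by
  induction ys with
  | nil => intro c n _ _; simp [rlGo, rlRec]
  | cons d rest ih =>
    intro c n hp hle
    have hp' := hp.of_cons
    have hdle : ∀ e ∈ rest, d ≤ e := fun e he => (List.pairwise_cons.mp hp).1 e he
    by_cases h : d = c
    · subst h
      rw [rlGo, if_pos rfl, ih d (n + 1) hp' hdle]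
      have hfil : (d :: rest).filter (fun e => e ≠ d) = rest.filter (fun e => e ≠ d) := by
        simp
      rw [hfil]
      congr 1
      rw [List.count_cons_self]
      push_cast
      ring
    · have hcd : c < d := lt_of_le_of_ne (hle d List.mem_cons_self) (fun e => h e.symm)
      have hnoc : rest.count c = 0 := by
        rw [List.count_eq_zero]
        intro hc
        exact absurd (hdle c hc) (not_le.mpr hcd)
      have hfilter : (d :: rest).filter (fun e => e ≠ c) = d :: rest := by
        rw [List.filter_eq_self]
        intro e he
        rcases List.mem_cons.mp he with rfl | he'
        · simpa using h
        · have : c < e := lt_of_lt_of_le hcd (hdle e he')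
          simpa using this.ne'
      rw [rlGo, if_neg h, hfilter]
      have : ((d :: rest).count c : Int) = 0 := by
        simp [h, hnoc]
      rw [rlRec, this]
      simp

lemma mem_rlRec_aux (m : Int) : ∀ (k : Nat) (zs : List Char), zs.length ≤ k →
    zs.Pairwise (· ≤ ·) → (m ∈ rlRec zs ↔ ∃ c ∈ zs, (zs.count c : Int) = m) := by
  intro k
  induction k with
  | zero =>
    intro zs hk _
    have : zs = [] := List.eq_nil_of_length_eq_zero (Nat.le_zero.mp hk)
    subst this
    simp [rlRec]
  | succ k ih =>
    intro zs hk hp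
    cases zs with
    | nil => simp [rlRec]
    | cons c ys =>
      have hle : ∀ d ∈ ys, c ≤ d := fun d hd => (List.pairwise_cons.mp hp).1 d hd
      have hp' := hp.of_cons
      rw [rlRec, rlGo_spec ys c 1 hp' hle]
      have hlen : (ys.filter (fun d => d ≠ c)).length ≤ k :=
        Nat.le_trans (List.length_filter_le _ ys) (by simpa using hk)
      have hpf : (ys.filter (fun d => d ≠ c)).Pairwise (· ≤ ·) :=
        hp'.sublist List.filter_sublist
      rw [List.mem_cons, ih _ hlen hpf]
      constructor
      · rintro (h | ⟨d, hd, hcnt⟩)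
        · refine ⟨c, List.mem_cons_self, ?_⟩
          rw [List.count_cons_self]
          push_cast
          omega
        · have hd' := List.mem_filter.mp hd
          have hdc : d ≠ c := by simpa using hd'.2
          refine ⟨d, List.mem_cons_of_mem _ hd'.1, ?_⟩
          rw [← hcnt]
          simp [List.count_filter, hdc, Ne.symm hdc]
      · rintro ⟨d, hd, hcnt⟩
        by_cases hdc : d = c
        · subst hdc
          left
          rw [← hcnt, List.count_cons_self]
          push_cast
          omega
        · right
          have hdys : d ∈ ys := by
            rcases List.mem_cons.mp hd with rfl | hdys
            · exact absurd rfl hdc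
            · exact hdys
          refine ⟨d, List.mem_filter.mpr ⟨hdys, by simpa using hdc⟩, ?_⟩
          rw [← hcnt]
          simp [List.count_filter, hdc, Ne.symm hdc]

lemma mem_rlRec (m : Int) (zs : List Char) (hp : zs.Pairwise (· ≤ ·)) :
    m ∈ rlRec zs ↔ ∃ c ∈ zs, (zs.count c : Int) = m :=
  mem_rlRec_aux m zs.length zs (Nat.le_refl _) hp

-- per-string: the run-length membership test equals the dict-values membership test
lemma mem_runLengths_iff_values (s : String) (m : Int) :
    (m ∈ runLengths (PySem.List.sorted s.toList (fun x => x) false)) ↔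
      m ∈ (get_counts s).values := by
  have hperm : (PySem.List.sorted s.toList (fun x => x) false).Perm s.toList :=
    PySem.List.sorted_perm s.toList (fun x => x) false
  have hpair : (PySem.List.sorted s.toList (fun x => x) false).Pairwise (· ≤ ·) := by
    simpa using PySem.List.sorted_pairwise s.toList (fun x => x)
  rw [runLengths_eq_rlRec, mem_rlRec m _ hpair]
  have hA : get_counts s = PySem.Dict.counter s.toList :=
    PySem.Dict.foldl_insert_getD_add_one_eq_counter s.toList
  have hv : (PySem.Dict.counter s.toList).values =
      (PySem.Set.ofList s.toList).map (fun k => (s.toList.count k : Int)) := by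
    show ((PySem.Dict.counter s.toList).items.map (·.2)) = _
    rw [PySem.Dict.items_counter]
    simp
  rw [hA, hv]
  simp only [List.mem_map, PySem.Set.mem_ofList]
  constructor
  · rintro ⟨c, hc, hcnt⟩
    refine ⟨c, hperm.mem_iff.mp hc, ?_⟩
    rw [← hcnt]
    exact congrArg (fun k : Nat => (k : Int)) (hperm.count_eq c).symm
  · rintro ⟨c, hc, hcnt⟩
    refine ⟨c, hperm.mem_iff.mpr hc, ?_⟩
    rw [← hcnt]
    exact congrArg (fun k : Nat => (k : Int)) (hperm.count_eq c)

-- ===== VERDICT (by name: the statement is the Claim_ definition above) =====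
theorem get_checksum_spec : Claim_equal_get_checksum := by
  intro inputs _
  unfold Spec_get_checksum get_checksum get_checksum_alt
  simp only [mem_runLengths_iff_values]
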